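-- pv_equiv track=rewrite | github.com/dennlinger/klexikon | klexikon/alignment/generate_sentence_alignments.py | generate_sentence_ngrams
-- ===== SOURCE A (Python) =====
-- from typing import List
--
-- def generate_sentence_ngrams(lines: List[str], n: int = 2) -> List[str]:
--     """
--     Generates up to n-gram pairs of sentences (within paragraphs only) of an article. E.g., for n=2,
--     the source will include all "normal" single sentences, as well as a combination of two successive sentences.
--     """
--     all_combinations = []
--
--     if n != 2:
--         raise ValueError("ngrams of more than 2 currently not supported!")
--
--     combination_candidate = ""
--     for line in lines:
--         line = line.strip("\n ")
--         if line and not line.startswith("=="):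
--             all_combinations.append(line)
--
--             if combination_candidate != "":
--                 all_combinations.append(f"{combination_candidate} {line}")
--
--             combination_candidate = line
--
--         else:  # This indicates a new paragraph
--             combination_candidate = ""
--     return all_combinations
-- ===== SOURCE B (Python) =====
-- def generate_sentence_ngrams(lines, n=2):
--     """Group lines into paragraphs first, then emit unigram/bigram pairs per paragraph."""
--     if n != 2:
--         raise ValueError("ngrams of more than 2 currently not supported!")
--
--     paragraphs = []
--     current = []
--     for line in lines:
--         line = line.strip("\n ")
--         if line and not line.startswith("=="):
--             current.append(line)
--         else:
--             if current:
--                 paragraphs.append(current)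
--             current = []
--     if current:
--         paragraphs.append(current)
--
--     out = []
--     for para in paragraphs:
--         out.append(para[0])
--         for prev, sent in zip(para, para[1:]):
--             out.append(sent)
--             out.append(f"{prev} {sent}")
--     return out
-- ===== Notes on version B (the rewrite author's own statement) =====
-- stated objective: alternative
-- what changed: B first groups the stripped lines into explicit paragraph lists, then emits each paragraph's unigrams and bigrams via zip(para, para[1:]), instead of A's single flat loop threading a running combination_candidate.
import Mathlib
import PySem

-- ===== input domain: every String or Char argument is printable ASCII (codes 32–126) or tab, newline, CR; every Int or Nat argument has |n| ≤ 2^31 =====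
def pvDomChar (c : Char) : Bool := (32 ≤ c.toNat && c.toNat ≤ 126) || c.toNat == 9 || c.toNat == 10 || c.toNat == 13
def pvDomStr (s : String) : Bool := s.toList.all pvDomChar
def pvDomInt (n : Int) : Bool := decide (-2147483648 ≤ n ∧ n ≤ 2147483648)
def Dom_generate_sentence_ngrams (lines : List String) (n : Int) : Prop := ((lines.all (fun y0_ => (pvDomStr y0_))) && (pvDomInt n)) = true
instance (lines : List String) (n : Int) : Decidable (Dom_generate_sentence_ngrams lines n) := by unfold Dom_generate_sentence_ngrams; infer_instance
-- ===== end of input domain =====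

-- B groups lines into paragraph lists first and then emits unigram/bigram pairs per
-- paragraph, instead of A's flat loop with a running candidate; same cost, different structure.

-- ===== PORT A =====
def aClean (l : String) : String := PySem.Str.stripChars l "\n "

-- A's loop: acc = all_combinations, cand = combination_candidate
def aGo : List String → List String → String → List String
  | [], acc, _ => acc
  | l :: ls, acc, cand =>
    let line := aClean l
    if line ≠ "" ∧ PySem.Str.startswith line "==" = false then
      aGo ls (acc ++ [line] ++ (if cand ≠ "" then [cand ++ " " ++ line] else [])) line
    else
      aGo ls acc ""

-- when n ≠ 2 Python A raises ValueError; Pre_ excludes that, the port returns []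
def generate_sentence_ngrams (lines : List String) (n : Int) : List String :=
  if n ≠ 2 then [] else aGo lines [] ""

-- ===== PORT B =====
def bClean (l : String) : String := PySem.Str.stripChars l "\n "

def bKeep (s : String) : Bool := s ≠ "" && !(PySem.Str.startswith s "==")

-- B's first loop: group the kept stripped lines into paragraphs (plus the trailing flush)
def bGroupGo : List String → List String → List (List String)
  | [], cur => if cur.isEmpty then [] else [cur]
  | l :: ls, cur =>
    let line := bClean l
    if bKeep line then bGroupGo ls (cur ++ [line])
    else if cur.isEmpty then bGroupGo ls [] else cur :: bGroupGo ls []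

-- B's inner loop over zip(para, para[1:]); a paragraph is never [] (para[0] would raise)
def bEmitPara (out : List String) (p : List String) : List String :=
  match p with
  | [] => out
  | x :: xs => (p.zip xs).foldl (fun acc pr => acc ++ [pr.2, pr.1 ++ " " ++ pr.2]) (out ++ [x])

def generate_sentence_ngrams_alt (lines : List String) (n : Int) : List String :=
  if n ≠ 2 then [] else (bGroupGo lines []).foldl bEmitPara []

-- ===== PRECONDITION & SPEC =====
-- Python A (and B) raise ValueError whenever n ≠ 2
def Pre_generate_sentence_ngrams (lines : List String) (n : Int) : Prop := n = 2
instance (lines : List String) (n : Int) : Decidable (Pre_generate_sentence_ngrams lines n) := by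
  unfold Pre_generate_sentence_ngrams; infer_instance

def pvWitness_generate_sentence_ngrams : List String × Int :=
  (["First sentence. ", "Second one.", "", "== Header ==", "Third."], 2)

def Spec_generate_sentence_ngrams (lines : List String) (n : Int) (out : List String) : Prop :=
  out = generate_sentence_ngrams_alt lines n
instance (lines : List String) (n : Int) (out : List String) : Decidable (Spec_generate_sentence_ngrams lines n out) := by
  unfold Spec_generate_sentence_ngrams; infer_instance

-- ===== CLAIM (what is proved, stated in full; the proofs are below) =====
def Claim_equal_generate_sentence_ngrams : Prop := ∀ (lines : List String) (n : Int), Dom_generate_sentence_ngrams lines n → Pre_generate_sentence_ngrams lines n → Spec_generate_sentence_ngrams lines n (generate_sentence_ngrams lines n)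

-- ===== LEMMAS AND PROOFS =====

-- reference emission of one paragraph, as a chain
def emitCont : String → List String → List String
  | _, [] => []
  | prev, y :: ys => y :: (prev ++ " " ++ y) :: emitCont y ys

def emitP : List String → List String
  | [] => []
  | x :: xs => x :: emitCont x xs

def flatEmit (gs : List (List String)) : List String := gs.flatMap emitP

theorem zip_foldl_emit (xs : List String) : ∀ (x : String) (acc : List String),
    ((x :: xs).zip xs).foldl (fun acc pr => acc ++ [pr.2, pr.1 ++ " " ++ pr.2]) acc
      = acc ++ emitCont x xs := by
  induction xs with
  | nil => intro x acc; simp [emitCont]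
  | cons y ys ih =>
      intro x acc
      rw [show (x :: y :: ys).zip (y :: ys) = (x, y) :: ((y :: ys).zip ys) from rfl,
          List.foldl_cons, ih y]
      simp [emitCont]

theorem bEmitPara_eq (out p : List String) : bEmitPara out p = out ++ emitP p := by
  cases p with
  | nil => simp [bEmitPara, emitP]
  | cons x xs =>
      show ((x :: xs).zip xs).foldl _ (out ++ [x]) = out ++ emitP (x :: xs)
      rw [zip_foldl_emit]; simp [emitP]

theorem foldl_bEmitPara (gs : List (List String)) : ∀ out,
    gs.foldl bEmitPara out = out ++ flatEmit gs := by
  induction gs with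
  | nil => intro out; simp [flatEmit]
  | cons g gs ih => intro out; simp [flatEmit, List.flatMap_cons, ih, bEmitPara_eq]

theorem emitCont_append (xs : List String) : ∀ (prev c : String),
    emitCont prev (xs ++ [c]) = emitCont prev xs ++ [c, (xs.getLast?.getD prev) ++ " " ++ c] := by
  induction xs with
  | nil => intro prev c; simp [emitCont]
  | cons y ys ih =>
      intro prev c
      simp [emitCont, ih y]
      cases ys <;> simp [List.getLast?]

theorem emitP_append (p : List String) (c : String) (h : p ≠ []) :
    emitP (p ++ [c]) = emitP p ++ [c, (p.getLast?.getD "") ++ " " ++ c] := by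
  cases p with
  | nil => exact absurd rfl h
  | cons x xs =>
      simp [emitP, emitCont_append]
      cases xs <;> simp [List.getLast?]

theorem aGo_acc (ls : List String) : ∀ (acc : List String) (cand : String),
    aGo ls acc cand = acc ++ aGo ls [] cand := by
  induction ls with
  | nil => intro acc cand; simp [aGo]
  | cons l ls ih =>
      intro acc cand
      simp only [aGo]
      split
      · rw [ih (acc ++ _ ++ _), ih ([] ++ _ ++ _)]; simp
      · exact ih acc ""

theorem main_inv (ls : List String) : ∀ (cur : List String) (cand : String),
    cand = cur.getLast?.getD "" → (cur = [] ↔ cand = "") →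
    flatEmit (bGroupGo ls cur) = emitP cur ++ aGo ls [] cand := by
  induction ls with
  | nil =>
      intro cur cand _ hiff
      cases cur with
      | nil => simp [bGroupGo, flatEmit, aGo, emitP]
      | cons x xs => simp [bGroupGo, flatEmit, aGo]
  | cons l ls ih =>
      intro cur cand hlast hiff
      have hclean : bClean l = aClean l := rfl
      by_cases hk : bKeep (aClean l) = true
      · have hne : aClean l ≠ "" := by
          simp [bKeep] at hk; exact hk.1
        have hsw : PySem.Str.startswith (aClean l) "==" = false := by
          simp [bKeep] at hk; exact hk.2
        have step : flatEmit (bGroupGo (l :: ls) cur) = flatEmit (bGroupGo ls (cur ++ [aClean l])) := by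
          simp only [bGroupGo, hclean, hk, if_pos]
        rw [step, ih (cur ++ [aClean l]) (aClean l) (by simp) (by simp [hne])]
        have harhs : aGo (l :: ls) [] cand
            = [aClean l] ++ (if cand ≠ "" then [cand ++ " " ++ aClean l] else []) ++ aGo ls [] (aClean l) := by
          simp only [aGo, if_pos (And.intro hne hsw)]
          rw [aGo_acc]; simp
        rw [harhs]
        cases cur with
        | nil =>
            have : cand = "" := hiff.mp rfl
            simp [this, emitP, emitCont]
        | cons x xs =>
            have hcne : cand ≠ "" := fun h => by
              have := hiff.mpr h; exact List.cons_ne_nil x xs this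
            rw [emitP_append (x :: xs) (aClean l) (List.cons_ne_nil x xs), ← hlast]
            simp [hcne]
      · have step : flatEmit (bGroupGo (l :: ls) cur) = emitP cur ++ flatEmit (bGroupGo ls []) := by
          simp only [bGroupGo, hclean, hk]
          cases cur with
          | nil => simp [emitP]
          | cons x xs => simp [flatEmit]
        have harhs : aGo (l :: ls) [] cand = aGo ls [] "" := by
          have : ¬ (aClean l ≠ "" ∧ PySem.Str.startswith (aClean l) "==" = false) := by
            rintro ⟨h1, h2⟩
            simp [bKeep, h1] at hk
            simp [hk] at h2
          simp only [aGo, if_neg this]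
        rw [step, harhs, ih [] "" (by simp) (by simp)]
        simp [emitP]

-- ===== VERDICT (by name: the statement is the Claim_ definition above) =====
theorem generate_sentence_ngrams_spec : Claim_equal_generate_sentence_ngrams := by
  intro lines n _ hpre
  unfold Spec_generate_sentence_ngrams generate_sentence_ngrams generate_sentence_ngrams_alt
  have h2 : ¬ (n ≠ 2) := by simp [Pre_generate_sentence_ngrams] at hpre; simp [hpre]
  rw [if_neg h2, if_neg h2, foldl_bEmitPara, main_inv lines [] "" (by simp) (by simp)]
  simp [emitP]
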